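-- pv_equiv track=rewrite | github.com/yql11299/fun-puzzle-game | Klotski/utils.py | _get_rotated_shapes
-- ===== SOURCE A (Python) =====
-- from typing import List, Tuple, Set, FrozenSet, Optional
--
-- def _get_rotated_shapes(shape: FrozenSet[Tuple[int, int]]) -> List[FrozenSet[Tuple[int, int]]]:
--     """
--     生成一个形状的所有可能旋转变体
--     :param shape: 一个frozenset of (i,j)坐标
--     :return: 所有唯一旋转变体的列表
--     """
--     if not shape:
--         return [shape]
--
--     # 获取形状的边界
--     min_i = min(pos[0] for pos in shape)
--     max_i = max(pos[0] for pos in shape)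
--     min_j = min(pos[1] for pos in shape)
--     max_j = max(pos[1] for pos in shape)
--
--     height = max_i - min_i + 1
--     width = max_j - min_j + 1
--
--     rotations = []
--
--     # 生成4种可能的旋转（0°, 90°, 180°, 270°）
--     for rotation in range(4):
--         if rotation == 0:
--             # 原始方向
--             rotated = shape
--         elif rotation == 1:
--             # 顺时针旋转90度
--             rotated = frozenset((pos[1], height - 1 - pos[0]) for pos in shape)
--         elif rotation == 2:
--             # 旋转180度
--             rotated = frozenset((height - 1 - pos[0], width - 1 - pos[1]) for pos in shape)
--         elif rotation == 3:
--             # 顺时针旋转270度（逆时针旋转90度）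
--             rotated = frozenset((width - 1 - pos[1], pos[0]) for pos in shape)
--
--         # 对旋转后的形状进行再规范化
--         min_ri = min(pos[0] for pos in rotated)
--         min_rj = min(pos[1] for pos in rotated)
--         normalized_rotated = frozenset((pos[0] - min_ri, pos[1] - min_rj) for pos in rotated)
--         rotations.append(normalized_rotated)
--
--     # 去重并返回所有唯一的旋转变体
--     return list(set(rotations))
-- ===== SOURCE B (Python) =====
-- def _get_rotated_shapes(shape):
--     """Same result, different decomposition: apply one 90-degree rotation
--     operator cumulatively four times, normalizing each intermediate shape."""
--     if not shape:
--         return [shape]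
--
--     def rotate90(s):
--         return frozenset((j, -i) for i, j in s)
--
--     def normalize(s):
--         mi = min(i for i, _ in s)
--         mj = min(j for _, j in s)
--         return frozenset((i - mi, j - mj) for i, j in s)
--
--     rotations = []
--     cur = shape
--     for _ in range(4):
--         rotations.append(normalize(cur))
--         cur = rotate90(cur)
--     return list(set(rotations))
-- ===== Notes on version B (the rewrite author's own statement) =====
-- stated objective: simpler
-- what changed: Replaces the four independent closed-form rotation formulas (with precomputed height/width) by one rotate90 operator (i,j)->(j,-i) applied cumulatively four times, normalizing each intermediate shape by its per-axis minima.
import Mathlib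
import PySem

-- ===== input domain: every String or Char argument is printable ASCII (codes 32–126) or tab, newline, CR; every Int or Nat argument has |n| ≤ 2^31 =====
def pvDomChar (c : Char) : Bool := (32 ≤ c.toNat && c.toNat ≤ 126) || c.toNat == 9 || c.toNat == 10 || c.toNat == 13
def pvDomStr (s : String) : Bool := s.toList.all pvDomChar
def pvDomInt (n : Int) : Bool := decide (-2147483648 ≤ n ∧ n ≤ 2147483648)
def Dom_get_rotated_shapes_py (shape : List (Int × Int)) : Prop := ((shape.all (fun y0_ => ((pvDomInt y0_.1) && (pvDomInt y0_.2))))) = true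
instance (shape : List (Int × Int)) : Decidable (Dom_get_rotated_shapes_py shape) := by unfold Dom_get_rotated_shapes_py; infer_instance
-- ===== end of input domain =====

-- B replaces A's four independent closed-form rotation formulas by one cumulative
-- rotate90 operator plus per-step normalization (a different decomposition, same cost).
-- Python sets/frozensets are Lean lists of distinct elements (PySem.Set); Python's
-- hash-based set order is not modelled, outputs are compared as finite sets.

-- ===== PORT A =====
-- `min(e for pos in s)` over a nonempty iterable is PySem.List.min? of the mapped list
-- (identity key); the `.getD 0` defaults are unreachable: every min?/max? below is applied
-- to a nonempty list (the branch is guarded by `shape ≠ []`), where min?/max? are `some _`.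
def get_rotated_shapes_py (shape : List (Int × Int)) : List (List (Int × Int)) :=
  if shape = [] then [shape] else
  let min_i := (PySem.List.min? (shape.map Prod.fst) (fun x => x)).getD 0
  let max_i := (PySem.List.max? (shape.map Prod.fst) (fun x => x)).getD 0
  let min_j := (PySem.List.min? (shape.map Prod.snd) (fun x => x)).getD 0
  let max_j := (PySem.List.max? (shape.map Prod.snd) (fun x => x)).getD 0
  let height := max_i - min_i + 1
  let width := max_j - min_j + 1
  let rotations := (PySem.List.pyRange 0 4 1).foldl (fun acc rotation =>
    let rotated : List (Int × Int) :=
      if rotation = 0 then shape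
      else if rotation = 1 then PySem.Set.ofList (shape.map (fun p => (p.2, height - 1 - p.1)))
      else if rotation = 2 then PySem.Set.ofList (shape.map (fun p => (height - 1 - p.1, width - 1 - p.2)))
      else PySem.Set.ofList (shape.map (fun p => (width - 1 - p.2, p.1)))
    let min_ri := (PySem.List.min? (rotated.map Prod.fst) (fun x => x)).getD 0
    let min_rj := (PySem.List.min? (rotated.map Prod.snd) (fun x => x)).getD 0
    acc ++ [PySem.Set.ofList (rotated.map (fun p => (p.1 - min_ri, p.2 - min_rj)))]) []
  PySem.Set.ofList rotations


-- ===== PORT B =====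
def pvRotate90 (s : List (Int × Int)) : List (Int × Int) :=
  PySem.Set.ofList (s.map (fun p => (p.2, -p.1)))

def pvNormalize (s : List (Int × Int)) : List (Int × Int) :=
  let mi := (PySem.List.min? (s.map Prod.fst) (fun x => x)).getD 0
  let mj := (PySem.List.min? (s.map Prod.snd) (fun x => x)).getD 0
  PySem.Set.ofList (s.map (fun p => (p.1 - mi, p.2 - mj)))

def get_rotated_shapes_py_alt (shape : List (Int × Int)) : List (List (Int × Int)) :=
  if shape = [] then [shape] else
  let st := (PySem.List.pyRange 0 4 1).foldl
      (fun (st : List (List (Int × Int)) × List (Int × Int)) _ =>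
        (st.1 ++ [pvNormalize st.2], pvRotate90 st.2)) ([], shape)
  PySem.Set.ofList st.1


-- ===== PRECONDITION & SPEC =====
def Spec_get_rotated_shapes_py (shape : List (Int × Int)) (out : List (List (Int × Int))) : Prop := out = get_rotated_shapes_py_alt shape
instance (shape : List (Int × Int)) (out : List (List (Int × Int))) : Decidable (Spec_get_rotated_shapes_py shape out) := by unfold Spec_get_rotated_shapes_py; infer_instance

-- ===== CLAIM (what is proved, stated in full; the proofs are below) =====
def Claim_equal_get_rotated_shapes_py : Prop := ∀ (shape : List (Int × Int)), Dom_get_rotated_shapes_py shape → Spec_get_rotated_shapes_py shape (get_rotated_shapes_py shape)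

-- ===== LEMMAS AND PROOFS =====
-- helper lemmas
lemma pv_min_id_eq_some {l : List Int} {v : Int} (hm : v ∈ l) (hb : ∀ y ∈ l, v ≤ y) :
    PySem.List.min? l (fun x => x) = some v := by
  cases h : PySem.List.min? l (fun x => x) with
  | none => rw [PySem.List.min?_eq_none_iff] at h; subst h; simp at hm
  | some m =>
    have h1 := PySem.List.min?_mem h
    have h2 := PySem.List.min?_isMin h v hm
    have h3 := hb m h1
    have h2' : m ≤ v := by simpa using h2
    simp [le_antisymm h2' h3]

lemma pv_min_map_eq {l : List (Int × Int)} (σ : (Int × Int) → Int) {v : Int}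
    (hmem : ∃ p ∈ l, σ p = v) (hle : ∀ p ∈ l, v ≤ σ p) :
    PySem.List.min? (List.map σ l) (fun x => x) = some v := by
  obtain ⟨p, hp, hpv⟩ := hmem
  refine pv_min_id_eq_some (hpv ▸ List.mem_map_of_mem hp) ?_
  intro y hy
  obtain ⟨q, hq, rfl⟩ := List.mem_map.mp hy
  exact hle q hq

lemma pv_ofList_map_inj {f : (Int × Int) → (Int × Int)} (hf : Function.Injective f)
    (l : List (Int × Int)) :
    PySem.Set.ofList (l.map f) = (PySem.Set.ofList l).map f := by
  induction l using List.reverseRecOn with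
  | nil => rfl
  | append_singleton t x ih =>
    rw [List.map_append, List.map_singleton, PySem.Set.ofList_append_singleton,
      PySem.Set.ofList_append_singleton, ih]
    by_cases hx : x ∈ PySem.Set.ofList t
    · have h1 : PySem.Set.add (PySem.Set.ofList t) x = PySem.Set.ofList t := by
        simp [PySem.Set.add, hx]
      have h2 : PySem.Set.add ((PySem.Set.ofList t).map f) (f x) = (PySem.Set.ofList t).map f := by
        simp [PySem.Set.add]
        exact ⟨x.1, x.2, by simpa using (PySem.Set.mem_ofList t x).mp hx, rfl⟩
      rw [h1, h2]
    · have h1 : PySem.Set.add (PySem.Set.ofList t) x = PySem.Set.ofList t ++ [x] := by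
        simp [PySem.Set.add, hx]
      have h2 : PySem.Set.add ((PySem.Set.ofList t).map f) (f x)
          = (PySem.Set.ofList t).map f ++ [f x] := by
        simp [PySem.Set.add]
        intro a b hab habx
        exact hx ((PySem.Set.mem_ofList t x).mpr (hf habx ▸ hab))
      rw [h1, h2, List.map_append, List.map_singleton]

lemma pv_ofList_map_ofList {g : (Int × Int) → (Int × Int)} (hg : Function.Injective g)
    (l : List (Int × Int)) :
    PySem.Set.ofList (List.map g (PySem.Set.ofList l)) = PySem.Set.ofList (List.map g l) := by
  rw [pv_ofList_map_inj hg, pv_ofList_map_inj hg, PySem.Set.ofList_ofList]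

lemma pv_inj_sub (a b : Int) : Function.Injective (fun p : Int × Int => (p.1 - a, p.2 - b)) := by
  intro ⟨x, y⟩ ⟨x', y'⟩ h
  simp only [Prod.mk.injEq] at h ⊢
  omega

lemma pv_norm_ofList_map {f : (Int × Int) → (Int × Int)} (hf : Function.Injective f)
    (shape : List (Int × Int)) (vi vj : Int)
    (hvi_mem : ∃ p ∈ shape, (f p).1 = vi) (hvi_le : ∀ p ∈ shape, vi ≤ (f p).1)
    (hvj_mem : ∃ p ∈ shape, (f p).2 = vj) (hvj_le : ∀ p ∈ shape, vj ≤ (f p).2) :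
    PySem.Set.ofList
      (List.map (fun p =>
        (p.1 - (PySem.List.min? (List.map Prod.fst (PySem.Set.ofList (List.map f shape))) (fun x => x)).getD 0,
         p.2 - (PySem.List.min? (List.map Prod.snd (PySem.Set.ofList (List.map f shape))) (fun x => x)).getD 0))
        (PySem.Set.ofList (List.map f shape)))
    = List.map (fun p => ((f p).1 - vi, (f p).2 - vj)) (PySem.Set.ofList shape) := by
  rw [pv_ofList_map_inj hf shape]
  simp only [List.map_map]
  have h1 : PySem.List.min? (List.map (Prod.fst ∘ f) (PySem.Set.ofList shape)) (fun x => x) = some vi := by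
    refine pv_min_map_eq (Prod.fst ∘ f) ?_ ?_
    · obtain ⟨p, hp, hpv⟩ := hvi_mem
      exact ⟨p, (PySem.Set.mem_ofList shape p).mpr hp, hpv⟩
    · intro p hp
      exact hvi_le p ((PySem.Set.mem_ofList shape p).mp hp)
  have h2 : PySem.List.min? (List.map (Prod.snd ∘ f) (PySem.Set.ofList shape)) (fun x => x) = some vj := by
    refine pv_min_map_eq (Prod.snd ∘ f) ?_ ?_
    · obtain ⟨p, hp, hpv⟩ := hvj_mem
      exact ⟨p, (PySem.Set.mem_ofList shape p).mpr hp, hpv⟩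
    · intro p hp
      exact hvj_le p ((PySem.Set.mem_ofList shape p).mp hp)
  rw [h1, h2]
  simp only [Option.getD_some]
  rw [pv_ofList_map_inj ((pv_inj_sub vi vj).comp hf), PySem.Set.ofList_ofList]
  simp [Function.comp]

lemma pv_main (shape : List (Int × Int)) (hne : shape ≠ []) :
    get_rotated_shapes_py shape = get_rotated_shapes_py_alt shape := by
  have hr : PySem.List.pyRange 0 4 1 = [0, 1, 2, 3] := by decide
  have hmape : shape.map Prod.fst ≠ [] := by simpa using hne
  have hmape' : shape.map Prod.snd ≠ [] := by simpa using hne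
  obtain ⟨mi, hmi⟩ : ∃ m, PySem.List.min? (List.map Prod.fst shape) (fun x => x) = some m := by
    cases h : PySem.List.min? (List.map Prod.fst shape) fun x => x with
    | none => rw [PySem.List.min?_eq_none_iff] at h; exact absurd h hmape
    | some m => exact ⟨m, rfl⟩
  obtain ⟨mj, hmj⟩ : ∃ m, PySem.List.min? (List.map Prod.snd shape) (fun x => x) = some m := by
    cases h : PySem.List.min? (List.map Prod.snd shape) fun x => x with
    | none => rw [PySem.List.min?_eq_none_iff] at h; exact absurd h hmape'
    | some m => exact ⟨m, rfl⟩
  obtain ⟨Mi, hMi⟩ : ∃ m, PySem.List.max? (List.map Prod.fst shape) (fun x => x) = some m := by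
    cases h : PySem.List.max? (List.map Prod.fst shape) fun x => x with
    | none => rw [PySem.List.max?_eq_none_iff] at h; exact absurd h hmape
    | some m => exact ⟨m, rfl⟩
  obtain ⟨Mj, hMj⟩ : ∃ m, PySem.List.max? (List.map Prod.snd shape) (fun x => x) = some m := by
    cases h : PySem.List.max? (List.map Prod.snd shape) fun x => x with
    | none => rw [PySem.List.max?_eq_none_iff] at h; exact absurd h hmape'
    | some m => exact ⟨m, rfl⟩
  rw [get_rotated_shapes_py, get_rotated_shapes_py_alt, if_neg hne, if_neg hne, hr]
  simp only [List.foldl_cons, List.foldl_nil, pvNormalize, pvRotate90]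
  norm_num
  simp only [hmi, hmj, hMi, hMj, Option.getD_some]
  have hrotinj : Function.Injective (fun p : Int × Int => (p.2, -p.1)) := by
    intro ⟨x, y⟩ ⟨x', y'⟩ h
    simp only [Prod.mk.injEq] at h ⊢
    omega
  rw [pv_ofList_map_ofList hrotinj]
  simp only [List.map_map]
  rw [pv_ofList_map_ofList hrotinj]
  simp only [List.map_map]
  -- extremal facts over shape
  obtain ⟨pmi, hpmi, hpmie⟩ : ∃ p ∈ shape, p.1 = mi := by
    obtain ⟨p, hp, hpe⟩ := List.mem_map.mp (PySem.List.min?_mem hmi); exact ⟨p, hp, hpe⟩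
  obtain ⟨pmj, hpmj, hpmje⟩ : ∃ p ∈ shape, p.2 = mj := by
    obtain ⟨p, hp, hpe⟩ := List.mem_map.mp (PySem.List.min?_mem hmj); exact ⟨p, hp, hpe⟩
  obtain ⟨pMi, hpMi, hpMie⟩ : ∃ p ∈ shape, p.1 = Mi := by
    obtain ⟨p, hp, hpe⟩ := List.mem_map.mp (PySem.List.max?_mem hMi); exact ⟨p, hp, hpe⟩
  obtain ⟨pMj, hpMj, hpMje⟩ : ∃ p ∈ shape, p.2 = Mj := by
    obtain ⟨p, hp, hpe⟩ := List.mem_map.mp (PySem.List.max?_mem hMj); exact ⟨p, hp, hpe⟩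
  have hmile : ∀ p ∈ shape, mi ≤ p.1 := fun p hp => by
    simpa using PySem.List.min?_isMin hmi p.1 (List.mem_map_of_mem hp)
  have hmjle : ∀ p ∈ shape, mj ≤ p.2 := fun p hp => by
    simpa using PySem.List.min?_isMin hmj p.2 (List.mem_map_of_mem hp)
  have hMile : ∀ p ∈ shape, p.1 ≤ Mi := fun p hp => by
    simpa using PySem.List.max?_isMax hMi p.1 (List.mem_map_of_mem hp)
  have hMjle : ∀ p ∈ shape, p.2 ≤ Mj := fun p hp => by
    simpa using PySem.List.max?_isMax hMj p.2 (List.mem_map_of_mem hp)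
  -- A side rotations
  rw [pv_norm_ofList_map (f := fun p : Int × Int => (p.2, Mi - mi - p.1))
    (by intro ⟨x, y⟩ ⟨x', y'⟩ h; simp only [Prod.mk.injEq] at h ⊢; omega)
    shape mj (-mi)
    ⟨pmj, hpmj, by simpa using hpmje⟩ (fun p hp => by simpa using hmjle p hp)
    ⟨pMi, hpMi, by simp; omega⟩ (fun p hp => by have := hMile p hp; simp; omega)]
  rw [pv_norm_ofList_map (f := fun p : Int × Int => (Mi - mi - p.1, Mj - mj - p.2))
    (by intro ⟨x, y⟩ ⟨x', y'⟩ h; simp only [Prod.mk.injEq] at h ⊢; omega)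
    shape (-mi) (-mj)
    ⟨pMi, hpMi, by simp; omega⟩ (fun p hp => by have := hMile p hp; simp; omega)
    ⟨pMj, hpMj, by simp; omega⟩ (fun p hp => by have := hMjle p hp; simp; omega)]
  rw [pv_norm_ofList_map (f := fun p : Int × Int => (Mj - mj - p.2, p.1))
    (by intro ⟨x, y⟩ ⟨x', y'⟩ h; simp only [Prod.mk.injEq] at h ⊢; omega)
    shape (-mj) mi
    ⟨pMj, hpMj, by simp; omega⟩ (fun p hp => by have := hMjle p hp; simp; omega)
    ⟨pmi, hpmi, by simpa using hpmie⟩ (fun p hp => by simpa using hmile p hp)]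
  -- B side rotations
  rw [pv_norm_ofList_map (f := fun p : Int × Int => (p.2, -p.1)) hrotinj
    shape mj (-Mi)
    ⟨pmj, hpmj, by simpa using hpmje⟩ (fun p hp => by simpa using hmjle p hp)
    ⟨pMi, hpMi, by simp; omega⟩ (fun p hp => by have := hMile p hp; simp; omega)]
  rw [pv_norm_ofList_map (f := (fun p : Int × Int => (p.2, -p.1)) ∘ fun p : Int × Int => (p.2, -p.1))
    (hrotinj.comp hrotinj)
    shape (-Mi) (-Mj)
    ⟨pMi, hpMi, by simp [Function.comp]; omega⟩
    (fun p hp => by have := hMile p hp; simp [Function.comp]; omega)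
    ⟨pMj, hpMj, by simp [Function.comp]; omega⟩
    (fun p hp => by have := hMjle p hp; simp [Function.comp]; omega)]
  rw [pv_norm_ofList_map
    (f := (fun p : Int × Int => (p.2, -p.1)) ∘ ((fun p : Int × Int => (p.2, -p.1)) ∘ fun p : Int × Int => (p.2, -p.1)))
    (hrotinj.comp (hrotinj.comp hrotinj))
    shape (-Mj) mi
    ⟨pMj, hpMj, by simp [Function.comp]; omega⟩
    (fun p hp => by have := hMjle p hp; simp [Function.comp]; omega)
    ⟨pmi, hpmi, by simp [Function.comp]; omega⟩
    (fun p hp => by have := hmile p hp; simp [Function.comp]; omega)]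
  congr 1
  simp only [List.cons.injEq, and_true]
  refine ⟨trivial, ?_, ?_, ?_⟩ <;>
  · apply List.map_congr_left
    intro p hp
    obtain ⟨a, b⟩ := p
    simp only [Function.comp_apply, Prod.mk.injEq]
    constructor <;> first | trivial | omega


-- ===== VERDICT (by name: the statement is the Claim_ definition above) =====
theorem get_rotated_shapes_py_spec : Claim_equal_get_rotated_shapes_py := by
  intro shape _
  unfold Spec_get_rotated_shapes_py
  by_cases hne : shape = []
  · rw [get_rotated_shapes_py, get_rotated_shapes_py_alt, if_pos hne, if_pos hne]
  · exact pv_main shape hne
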